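-- pv_equiv track=rewrite | github.com/marcelopborges/sian-process-intelligence | src/app/model/event_aggregation.py | aggregate_dbt_alignment
-- ===== SOURCE A (Python) =====
-- def aggregate_dbt_alignment(classifications: list[str]) -> str:
--     """
--     Agrega classificações dbt dos candidatos que compõem o evento (time + atributos).
--
--     Prioridade: ALINHADO_MART → ALINHADO; SEM_COLUNA → BAIXA_CONFIANCA;
--     EXISTE_NA_FONTE_NAO_USADO → PARCIAL; demais → PARCIAL.
--     """
--     if any(x == "ALINHADO_MART" for x in classifications):
--         return "ALINHADO"
--     if any(x == "SEM_COLUNA_NA_FONTE" for x in classifications):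
--         return "BAIXA_CONFIANCA"
--     if any(x == "EXISTE_NA_FONTE_NAO_USADO" for x in classifications):
--         return "PARCIAL"
--     return "PARCIAL"
-- ===== SOURCE B (Python) =====
-- _RANK = {"ALINHADO_MART": 0, "SEM_COLUNA_NA_FONTE": 1}
-- _LABEL = ["ALINHADO", "BAIXA_CONFIANCA", "PARCIAL"]
--
-- def aggregate_dbt_alignment(classifications: list[str]) -> str:
--     rank = 2
--     for x in classifications:
--         rank = min(rank, _RANK.get(x, 2))
--     return _LABEL[rank]
-- ===== Notes on version B (the rewrite author's own statement) =====
-- stated objective: alternative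
-- what changed: Replaced three ordered any()-membership scans over the list by a single pass computing the minimum priority rank (0/1/2) and a final rank-to-label table lookup.
import Mathlib
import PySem

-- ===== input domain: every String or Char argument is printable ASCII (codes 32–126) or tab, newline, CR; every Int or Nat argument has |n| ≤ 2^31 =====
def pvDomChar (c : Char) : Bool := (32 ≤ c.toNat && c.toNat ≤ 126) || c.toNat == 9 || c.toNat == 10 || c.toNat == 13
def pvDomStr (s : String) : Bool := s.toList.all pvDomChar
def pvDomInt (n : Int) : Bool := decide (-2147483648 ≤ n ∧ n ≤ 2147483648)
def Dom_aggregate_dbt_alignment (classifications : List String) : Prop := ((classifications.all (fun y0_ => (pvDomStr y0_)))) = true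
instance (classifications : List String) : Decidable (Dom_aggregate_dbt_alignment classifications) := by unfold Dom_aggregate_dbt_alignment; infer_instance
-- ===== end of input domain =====

-- B replaces A's three ordered any()-scans by a single-pass minimum-priority-rank fold with a rank→label table (alternative decomposition, same cost).


-- ===== PORT A =====
def aggregate_dbt_alignment (classifications : List String) : String :=
  if classifications.any (fun x => x == "ALINHADO_MART") then "ALINHADO"
  else if classifications.any (fun x => x == "SEM_COLUNA_NA_FONTE") then "BAIXA_CONFIANCA"
  else if classifications.any (fun x => x == "EXISTE_NA_FONTE_NAO_USADO") then "PARCIAL"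
  else "PARCIAL"

-- ===== PORT B =====
-- B: single pass taking the minimum priority rank, then a rank→label table.
def pvRankDict : PySem.Dict String Nat :=
  (PySem.Dict.empty.insert "ALINHADO_MART" 0).insert "SEM_COLUNA_NA_FONTE" 1

def pvLabels : List String := ["ALINHADO", "BAIXA_CONFIANCA", "PARCIAL"]

def aggregate_dbt_alignment_alt (classifications : List String) : String :=
  let rank := classifications.foldl (fun r x => min r (pvRankDict.getD x 2)) 2
  pvLabels.getD rank ""

-- ===== PRECONDITION & SPEC =====
def Spec_aggregate_dbt_alignment (classifications : List String) (out : String) : Prop := out = aggregate_dbt_alignment_alt classifications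
instance (classifications : List String) (out : String) : Decidable (Spec_aggregate_dbt_alignment classifications out) := by unfold Spec_aggregate_dbt_alignment; infer_instance

-- ===== CLAIM (what is proved, stated in full; the proofs are below) =====
def Claim_equal_aggregate_dbt_alignment : Prop := ∀ (classifications : List String), Dom_aggregate_dbt_alignment classifications → Spec_aggregate_dbt_alignment classifications (aggregate_dbt_alignment classifications)

-- ===== LEMMAS AND PROOFS =====

-- ===== VERDICT (by name: the statement is the Claim_ definition above) =====
-- A-side rank: the rank A's ordered scans would pick.
def pvARank (l : List String) : Nat :=
  if l.any (fun x => x == "ALINHADO_MART") then 0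
  else if l.any (fun x => x == "SEM_COLUNA_NA_FONTE") then 1
  else 2

lemma getD_rankDict (y : String) :
    pvRankDict.getD y 2 = if y = "ALINHADO_MART" then 0
      else if y = "SEM_COLUNA_NA_FONTE" then 1 else 2 := by
  by_cases h0 : y = "ALINHADO_MART"
  · subst h0; decide
  · have e0 : (("ALINHADO_MART" : String) == y) = false := by
      simp; exact Ne.symm h0
    by_cases h1 : y = "SEM_COLUNA_NA_FONTE"
    · subst h1
      simp [pvRankDict, PySem.Dict.getD, PySem.Dict.get?, PySem.Dict.insert,
        PySem.Dict.empty, h0]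
    · have e1 : (("SEM_COLUNA_NA_FONTE" : String) == y) = false := by
        simp; exact Ne.symm h1
      simp [pvRankDict, PySem.Dict.getD, PySem.Dict.get?, PySem.Dict.insert,
        PySem.Dict.empty, h0, h1, e0, e1]

lemma foldl_min_rank (l : List String) (r : Nat) (hr : r ≤ 2) :
    l.foldl (fun r x => min r (pvRankDict.getD x 2)) r = min r (pvARank l) := by
  induction l generalizing r with
  | nil => simp [pvARank]; omega
  | cons x xs ih =>
    have hx := getD_rankDict x
    have hle : pvRankDict.getD x 2 ≤ 2 := by rw [hx]; split_ifs <;> omega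
    simp only [List.foldl_cons, ih _ (le_trans (min_le_right _ _) hle),
      pvARank, List.any_cons]
    rw [hx]
    by_cases h0 : x = "ALINHADO_MART" <;> by_cases h1 : x = "SEM_COLUNA_NA_FONTE" <;>
      simp [h0, h1] <;> split_ifs <;> omega

theorem aggregate_dbt_alignment_spec : Claim_equal_aggregate_dbt_alignment := by
  intro l _
  show aggregate_dbt_alignment l = aggregate_dbt_alignment_alt l
  unfold aggregate_dbt_alignment aggregate_dbt_alignment_alt
  rw [foldl_min_rank _ _ (by omega)]
  unfold pvARank
  split_ifs <;> rfl
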